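-- pv_equiv track=rewrite | github.com/sambacha/nix-env | layer.py | find_duplicate_refs
-- ===== SOURCE A (Python) =====
-- def find_duplicate_refs(layers):
--     dups = set()
--     for layer_key, layer in layers.items():
--         for l_k, l in layers.items():
--             if layer_key == l_k:
--                 continue
--             dups.update(l.intersection(layer))
--     return dups
-- ===== SOURCE B (Python) =====
-- def find_duplicate_refs(layers):
--     # Two linear passes instead of intersecting every ordered pair of layers.
--     # Pass 1: remember, for each ref, the first layer that contains it.
--     first = {}
--     for key, layer in layers.items():
--         for x in layer:
--             if x not in first:
--                 first[x] = key
--     # Pass 2: a ref seen in a layer other than its first one is duplicated;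
--     # group it under the layer that introduced it.
--     buckets = {key: set() for key in layers}
--     for key, layer in layers.items():
--         for x in layer:
--             f = first[x]
--             if f != key:
--                 buckets[f].add(x)
--     dups = set()
--     for b in buckets.values():
--         dups.update(b)
--     return dups
-- ===== Notes on version B (the rewrite author's own statement) =====
-- stated objective: faster
-- what changed: Replaces the nested loop over all ordered pairs of layers (one set intersection per pair) with two linear passes: the first records each ref's first containing layer, the second collects every ref that reappears outside that layer, grouped under the layer that introduced it.
import Mathlib
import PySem

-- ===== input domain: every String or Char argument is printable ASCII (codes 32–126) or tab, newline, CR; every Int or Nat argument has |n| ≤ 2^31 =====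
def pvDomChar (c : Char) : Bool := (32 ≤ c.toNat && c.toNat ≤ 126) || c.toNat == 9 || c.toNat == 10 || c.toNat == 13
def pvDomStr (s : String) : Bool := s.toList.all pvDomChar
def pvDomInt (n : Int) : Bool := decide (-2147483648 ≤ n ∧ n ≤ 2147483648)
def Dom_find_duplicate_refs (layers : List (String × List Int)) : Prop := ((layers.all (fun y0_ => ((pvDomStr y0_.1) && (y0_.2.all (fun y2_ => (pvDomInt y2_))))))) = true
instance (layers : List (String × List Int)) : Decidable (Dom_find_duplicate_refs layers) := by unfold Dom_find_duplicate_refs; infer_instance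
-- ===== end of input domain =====

-- B replaces A's nested loop over all ordered pairs of layers (one set intersection per
-- pair) by two linear passes: record each ref's first layer, then collect every ref that
-- reappears outside that layer, grouped under the layer that introduced it.

-- ===== PORT A =====
-- `layers` is a dict str -> set[int]: an insertion-ordered association list whose
-- values list the sets' distinct elements (PySem.Set values).
def find_duplicate_refs (layers : List (String × List Int)) : List Int :=
  layers.foldl (fun dups kl =>
    layers.foldl (fun dups kl2 =>
      if kl.1 == kl2.1 then dups
      else PySem.Set.update dups
        (PySem.Set.inter (PySem.Set.ofList kl2.2) (PySem.Set.ofList kl.2)))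
      dups)
    PySem.Set.empty

-- ===== PORT B =====
-- B's locals become helper definitions; each is the literal port of the Source B loop
-- that builds the corresponding variable.

-- first = {}; for key, layer in layers.items(): for x in layer: if x not in first: first[x] = key
def pvFirstD (layers : List (String × List Int)) : PySem.Dict Int String :=
  layers.foldl (fun d kl =>
    kl.2.foldl (fun d x => if d.contains x then d else d.insert x kl.1) d)
    PySem.Dict.empty

-- buckets = {key: set() for key in layers}
def pvBuckets0 (layers : List (String × List Int)) : PySem.Dict String (PySem.Set Int) :=
  layers.foldl (fun b kl => b.insert kl.1 PySem.Set.empty) PySem.Dict.empty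

-- loop body of the second pass: f = first[x]; if f != key: buckets[f].add(x)
def pvStepB (first : PySem.Dict Int String) (key : String)
    (b : PySem.Dict String (PySem.Set Int)) (x : Int) : PySem.Dict String (PySem.Set Int) :=
  -- first[x]: x was inserted by the first pass, so the getD default is never read
  let f := (first.get? x).getD ""
  if f == key then b
  else PySem.Dict.modify b f PySem.Set.empty (fun s => PySem.Set.add s x)

-- for key, layer in layers.items(): for x in layer: (loop body above)
def pvBucketsFinal (layers : List (String × List Int)) : PySem.Dict String (PySem.Set Int) :=
  layers.foldl (fun b kl => kl.2.foldl (pvStepB (pvFirstD layers) kl.1) b)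
    (pvBuckets0 layers)

-- dups = set(); for b in buckets.values(): dups.update(b); return dups
def find_duplicate_refs_alt (layers : List (String × List Int)) : List Int :=
  (PySem.Dict.values (pvBucketsFinal layers)).foldl
    (fun dups b => PySem.Set.update dups b) PySem.Set.empty

-- ===== PRECONDITION & SPEC =====
-- Pre_ only states that the argument really encodes a Python dict[str, set[int]]:
-- keys pairwise distinct (a dict) and each value a list of distinct elements (a set).
-- Association lists violating this correspond to no Python input of A.
def Pre_find_duplicate_refs (layers : List (String × List Int)) : Prop :=
  (layers.map Prod.fst).Nodup ∧ ∀ kl ∈ layers, kl.2.Nodup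
instance (layers : List (String × List Int)) : Decidable (Pre_find_duplicate_refs layers) := by
  unfold Pre_find_duplicate_refs; infer_instance

def pvWitness_find_duplicate_refs : (List (String × List Int)) :=
  [("base", [1, 2]), ("app", [2, 3]), ("cfg", [3])]

def Spec_find_duplicate_refs (layers : List (String × List Int)) (out : List Int) : Prop := out = find_duplicate_refs_alt layers
instance (layers : List (String × List Int)) (out : List Int) : Decidable (Spec_find_duplicate_refs layers out) := by unfold Spec_find_duplicate_refs; infer_instance

-- ===== CLAIM (what is proved, stated in full; the proofs are below) =====
def Claim_equal_find_duplicate_refs : Prop := ∀ (layers : List (String × List Int)), Dom_find_duplicate_refs layers → Pre_find_duplicate_refs layers → Spec_find_duplicate_refs layers (find_duplicate_refs layers)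

-- ===== LEMMAS AND PROOFS =====

-- the inner segment contributed by outer entry `a` of A's nested loop
def pvInner (L : List (String × List Int)) (a : String × List Int) : List Int :=
  L.flatMap (fun b => if a.1 == b.1 then [] else
    PySem.Set.inter (PySem.Set.ofList b.2) (PySem.Set.ofList a.2))

-- key of the first layer containing x (what B's dict `first` computes)
def pvFirst? (L : List (String × List Int)) (x : Int) : Option String :=
  (L.find? (fun kl => kl.2.contains x)).map Prod.fst

-- elements that land in the bucket of layer key k, in arrival order
def pvStream (L : List (String × List Int)) (k : String) : List Int :=
  L.flatMap (fun ql => ql.2.filter (fun x => pvFirst? L x == some k && !(k == ql.1)))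

-- B's result, closed form: buckets in layer order
def pvClosed (L : List (String × List Int)) : List Int :=
  (L.map (fun kl => PySem.Set.ofList (pvStream L kl.1))).flatten

-- elements of the head layer that reappear in a later layer, in arrival order
def pvS0 (e : String × List Int) (rest : List (String × List Int)) : List Int :=
  rest.flatMap (fun b => PySem.Set.inter (PySem.Set.ofList b.2) (PySem.Set.ofList e.2))

-- ---- generic fold/list lemmas ----

theorem pv_update_flatMap {α β : Type} [BEq α] (g : β → List α) :
    ∀ (l : List β) (d : PySem.Set α),
      l.foldl (fun d b => PySem.Set.update d (g b)) d = PySem.Set.update d (l.flatMap g) := by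
  intro l
  induction l with
  | nil => intro d; rfl
  | cons b l ih =>
      intro d
      rw [List.foldl_cons, List.flatMap_cons, PySem.Set.update_append, ih]

theorem pv_update_of_forall_mem {α : Type} [BEq α] [LawfulBEq α] :
    ∀ (u : List α) (d : PySem.Set α), (∀ x ∈ u, x ∈ d) → PySem.Set.update d u = d := by
  intro u
  induction u with
  | nil => intro d _; rfl
  | cons x u ih =>
      intro d h
      rw [PySem.Set.update_cons, PySem.Set.add_of_mem (h x (by simp))]
      exact ih d (fun y hy => h y (by simp [hy]))

theorem pv_mem_update_left {α : Type} [BEq α] [LawfulBEq α] (d : PySem.Set α) (t : List α)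
    (x : α) (h : x ∈ d) : x ∈ PySem.Set.update d t := by
  rw [PySem.Set.mem_update]; exact Or.inl h

theorem pv_absorb {α β : Type} [BEq α] [LawfulBEq α] (u t : β → List α) :
    ∀ (l : List β) (d : PySem.Set α), (∀ a ∈ l, ∀ x ∈ u a, x ∈ d) →
      l.foldl (fun d a => PySem.Set.update d (u a ++ t a)) d
        = l.foldl (fun d a => PySem.Set.update d (t a)) d := by
  intro l
  induction l with
  | nil => intro d _; rfl
  | cons a l ih =>
      intro d h
      rw [List.foldl_cons, List.foldl_cons, PySem.Set.update_append,
        pv_update_of_forall_mem (u a) d (h a (by simp))]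
      exact ih _ (fun a' ha' x hx =>
        pv_mem_update_left d (t a) x (h a' (by simp [ha']) x hx))

theorem pv_ofList_filter {α : Type} [BEq α] [LawfulBEq α] (p : α → Bool) :
    ∀ (l : List α), PySem.Set.ofList (l.filter p) = (PySem.Set.ofList l).filter p := by
  have key : ∀ (s : PySem.Set α) (x : α), p x = true →
      PySem.Set.add (s.filter p) x = (PySem.Set.add s x).filter p := by
    intro s x hp
    by_cases hm : x ∈ s <;>
      simp [PySem.Set.add, PySem.Set.contains_eq_listContains, List.contains_eq_mem,
        List.mem_filter, hm, hp, List.filter_append]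
  intro l
  induction l using List.reverseRecOn with
  | nil => rfl
  | append_singleton l x ih =>
      rw [List.filter_append, PySem.Set.ofList_append_singleton]
      by_cases hp : p x = true
      · have hx : List.filter p [x] = [x] := by simp [hp]
        rw [hx, PySem.Set.ofList_append_singleton, ih, key _ _ hp]
      · have hp' : p x = false := by simpa using hp
        have hx : List.filter p [x] = [] := by simp [hp']
        rw [hx, List.append_nil, ih]
        by_cases hm : x ∈ PySem.Set.ofList l
        · rw [PySem.Set.add_of_mem hm]
        · rw [PySem.Set.add_of_not_mem hm, List.filter_append]
          simp [hp']

theorem pv_cond_add {α : Type} [BEq α] (p : α → Bool) :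
    ∀ (l : List α) (s : PySem.Set α),
      l.foldl (fun s x => if p x then PySem.Set.add s x else s) s
        = PySem.Set.update s (l.filter p) := by
  intro l
  induction l with
  | nil => intro s; rfl
  | cons x l ih =>
      intro s
      by_cases hp : p x = true
      · simp only [List.foldl_cons, List.filter_cons, hp, if_pos]
        rw [ih, PySem.Set.update_cons]
      · have hp' : p x = false := by simpa using hp
        simp only [List.foldl_cons, List.filter_cons, hp']
        simp only [Bool.false_eq_true, if_neg]
        exact ih s

theorem pv_flatMap_congr {α β : Type} :
    ∀ (l : List α) (f g : α → List β),
      (∀ a ∈ l, f a = g a) → l.flatMap f = l.flatMap g := by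
  intro l
  induction l with
  | nil => intro f g _; rfl
  | cons a l ih =>
      intro f g h
      rw [List.flatMap_cons, List.flatMap_cons, h a (by simp),
        ih f g (fun b hb => h b (by simp [hb]))]

theorem pv_filter_flatten {α : Type} (p : α → Bool) :
    ∀ (ls : List (List α)), ls.flatten.filter p = (ls.map (fun l => l.filter p)).flatten := by
  intro ls
  induction ls with
  | nil => rfl
  | cons l ls ih => rw [List.flatten_cons, List.filter_append, ih, List.map_cons,
      List.flatten_cons]

-- ---- A-side closed form ----

theorem pv_A_closed (L : List (String × List Int)) :
    find_duplicate_refs L = PySem.Set.ofList (L.flatMap (pvInner L)) := by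
  unfold find_duplicate_refs
  have inner : ∀ (kl : String × List Int) (d : PySem.Set Int),
      L.foldl (fun dups kl2 =>
        if kl.1 == kl2.1 then dups
        else PySem.Set.update dups
          (PySem.Set.inter (PySem.Set.ofList kl2.2) (PySem.Set.ofList kl.2))) d
      = PySem.Set.update d (pvInner L kl) := by
    intro kl d
    rw [PySem.List.foldl_congr_mem L _
      (fun dups kl2 => PySem.Set.update dups
        (if kl.1 == kl2.1 then []
         else PySem.Set.inter (PySem.Set.ofList kl2.2) (PySem.Set.ofList kl.2))) d
      (by
        intro acc kl2 _
        beta_reduce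
        by_cases h : (kl.1 == kl2.1) = true
        · rw [if_pos h, if_pos h]; rfl
        · rw [if_neg h, if_neg h])]
    exact pv_update_flatMap _ L d
  rw [PySem.List.foldl_congr_mem L _
    (fun dups kl => PySem.Set.update dups (pvInner L kl)) PySem.Set.empty
    (fun acc kl _ => inner kl acc)]
  exact pv_update_flatMap (pvInner L) L PySem.Set.empty

-- ---- dict lemmas ----

theorem pv_any_eq_isSome {κ ν : Type} [BEq κ] (items : List (κ × ν)) (k : κ) :
    items.any (fun p => p.1 == k) = (items.find? (fun p => p.1 == k)).isSome := by
  induction items with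
  | nil => rfl
  | cons p l ih => by_cases h : (p.1 == k) = true <;> simp [List.find?_cons, h, ih]

theorem pv_dict_contains_isSome {κ ν : Type} [BEq κ] (d : PySem.Dict κ ν) (k : κ) :
    d.contains k = (d.get? k).isSome := by
  show d.items.any (fun p => p.1 == k) = _
  rw [pv_any_eq_isSome]
  unfold PySem.Dict.get?
  rw [Option.isSome_map]

theorem pv_find?_beq_self {α : Type} [BEq α] [LawfulBEq α] (K : List α) (k0 : α) (h : k0 ∈ K) :
    K.find? (fun k => k == k0) = some k0 := by
  induction K with
  | nil => cases h
  | cons k K ih =>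
      rw [List.find?_cons]
      by_cases hk : (k == k0) = true
      · simp only [hk]
        exact congrArg some (by simpa using hk)
      · have hk' : (k == k0) = false := by simpa using hk
        simp only [hk']
        have : k0 ∈ K := by
          rcases List.mem_cons.mp h with h1 | h1
          · exact absurd (by simp [h1]) hk
          · exact h1
        exact ih this

theorem pv_dict_get?_mapkeys {ν : Type} (K : List String) (w : String → ν) (k0 : String)
    (h : k0 ∈ K) :
    PySem.Dict.get? ⟨K.map (fun k => (k, w k))⟩ k0 = some (w k0) := by
  unfold PySem.Dict.get?
  show Option.map Prod.snd ((K.map (fun k => (k, w k))).find? (fun p => p.1 == k0)) = _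
  rw [List.find?_map]
  have he : ((fun (p : String × ν) => p.1 == k0) ∘ (fun k => (k, w k))) = fun k => k == k0 := rfl
  rw [he, pv_find?_beq_self K k0 h]
  rfl

theorem pv_modify_items {ν : Type} (K : List String) (w : String → ν) (k0 : String)
    (dflt : ν) (f : ν → ν) (h : k0 ∈ K) :
    PySem.Dict.modify ⟨K.map (fun k => (k, w k))⟩ k0 dflt f
      = PySem.Dict.mk (K.map (fun k => (k, if k == k0 then f (w k) else w k))) := by
  unfold PySem.Dict.modify
  have hget : PySem.Dict.getD ⟨K.map (fun k => (k, w k))⟩ k0 dflt = w k0 := by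
    unfold PySem.Dict.getD
    rw [pv_dict_get?_mapkeys K w k0 h]
    rfl
  rw [hget]
  unfold PySem.Dict.insert
  have hc : PySem.Dict.contains ⟨K.map (fun k => (k, w k))⟩ k0 = true := by
    rw [pv_dict_contains_isSome, pv_dict_get?_mapkeys K w k0 h]
    rfl
  rw [if_pos hc]
  congr 1
  show (K.map (fun k => (k, w k))).map (fun p => if p.1 == k0 then (k0, f (w k0)) else p) = _
  rw [List.map_map]
  apply List.map_congr_left
  intro k _
  by_cases hk : (k == k0) = true
  · have hkk : k = k0 := by simpa using hk
    subst hkk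
    simp [hk]
  · have hk' : (k == k0) = false := by simpa using hk
    have h1 : ¬ (((k, w k).1 == k0) = true) := by simp [hk']
    have h2 : ¬ ((k == k0) = true) := by simp [hk']
    simp only [Function.comp_apply]
    rw [if_neg h1, if_neg h2]

-- ---- B's first pass computes pvFirst? ----

theorem pv_first_inner (k : String) :
    ∀ (l : List Int) (d : PySem.Dict Int String) (y : Int),
      (l.foldl (fun d x => if d.contains x then d else d.insert x k) d).get? y
        = (d.get? y).or (if l.contains y then some k else none) := by
  intro l
  induction l with
  | nil => intro d y; simp
  | cons x l ih =>
      intro d y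
      rw [List.foldl_cons]
      by_cases hc : d.contains x = true
      · rw [if_pos hc, ih]
        by_cases hxy : y = x
        · subst hxy
          have hs : (d.get? y).isSome := by rw [← pv_dict_contains_isSome]; exact hc
          obtain ⟨v, hv⟩ := Option.isSome_iff_exists.mp hs
          simp [hv]
        · simp [List.contains_cons, hxy]
      · rw [if_neg hc, ih]
        by_cases hxy : y = x
        · subst hxy
          rw [PySem.Dict.get?_insert_self]
          have hd : d.get? y = none := by
            rw [← Option.not_isSome_iff_eq_none, ← pv_dict_contains_isSome]
            simpa using hc
          simp [hd, List.contains_cons]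
        · rw [PySem.Dict.get?_insert_of_ne d k hxy]
          simp [List.contains_cons, hxy]

theorem pv_first_outer :
    ∀ (L : List (String × List Int)) (d : PySem.Dict Int String) (y : Int),
      (L.foldl (fun d kl =>
          kl.2.foldl (fun d x => if d.contains x then d else d.insert x kl.1) d) d).get? y
        = (d.get? y).or (pvFirst? L y) := by
  intro L
  induction L with
  | nil => intro d y; simp [pvFirst?]
  | cons kl L ih =>
      intro d y
      rw [List.foldl_cons, ih, pv_first_inner, Option.or_assoc]
      congr 1
      unfold pvFirst?
      rw [List.find?_cons]
      by_cases h : y ∈ kl.2 <;> simp [h]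

theorem pv_first_char (L : List (String × List Int)) (x : Int) :
    (pvFirstD L).get? x = pvFirst? L x := by
  unfold pvFirstD
  rw [pv_first_outer L PySem.Dict.empty x]
  rfl

-- ---- B's buckets ----

theorem pv_buckets0 :
    ∀ (L : List (String × List Int)) (d : PySem.Dict String (PySem.Set Int)),
      (∀ kl ∈ L, d.contains kl.1 = false) → (L.map Prod.fst).Nodup →
      L.foldl (fun b kl => b.insert kl.1 PySem.Set.empty) d
        = ⟨d.items ++ L.map (fun kl => (kl.1, PySem.Set.empty))⟩ := by
  intro L
  induction L with
  | nil => intro d _ _; simp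
  | cons kl L ih =>
      intro d h hn
      rw [List.foldl_cons]
      have hc : d.contains kl.1 = false := h kl (by simp)
      have hins : d.insert kl.1 PySem.Set.empty = ⟨d.items ++ [(kl.1, PySem.Set.empty)]⟩ := by
        unfold PySem.Dict.insert
        rw [if_neg (by simp [hc])]
      rw [hins, ih ⟨d.items ++ [(kl.1, PySem.Set.empty)]⟩ ?hcont ?hnod]
      · simp
      case hcont =>
        intro kl' hkl'
        show (d.items ++ [(kl.1, PySem.Set.empty)]).any (fun p => p.1 == kl'.1) = false
        rw [List.any_append]
        have h1 : d.items.any (fun p => p.1 == kl'.1) = false := h kl' (by simp [hkl'])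
        have h2 : kl.1 ≠ kl'.1 := by
          intro he
          have hm : kl'.1 ∈ L.map Prod.fst := List.mem_map.mpr ⟨kl', hkl', rfl⟩
          rw [← he] at hm
          exact (List.nodup_cons.mp (by simpa using hn)).1 hm
        simp [h1, h2]
      case hnod => exact (List.nodup_cons.mp (by simpa using hn)).2

theorem pv_first?_mem_keys (L : List (String × List Int)) (x : Int) (k : String)
    (h : pvFirst? L x = some k) : k ∈ L.map Prod.fst := by
  unfold pvFirst? at h
  cases hf : L.find? (fun kl => kl.2.contains x) with
  | none => rw [hf] at h; cases h
  | some kl =>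
      rw [hf] at h
      have hk : kl.1 = k := by injection h
      exact hk ▸ List.mem_map.mpr ⟨kl, List.mem_of_find?_eq_some hf, rfl⟩

theorem pv_first_mem (L : List (String × List Int)) (x : Int)
    (h : ∃ kl ∈ L, x ∈ kl.2) :
    ∃ k0, pvFirst? L x = some k0 ∧ k0 ∈ L.map Prod.fst := by
  have hs : (L.find? (fun kl => kl.2.contains x)).isSome = true := by
    rw [List.find?_isSome]
    obtain ⟨kl, hkl, hx⟩ := h
    exact ⟨kl, hkl, by simpa using hx⟩
  obtain ⟨kl, hkl⟩ := Option.isSome_iff_exists.mp hs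
  refine ⟨kl.1, ?_, List.mem_map.mpr ⟨kl, List.mem_of_find?_eq_some hkl, rfl⟩⟩
  unfold pvFirst?
  rw [hkl]
  rfl

theorem pv_scan_inner (first : PySem.Dict Int String) (L : List (String × List Int))
    (hfirst : ∀ x, first.get? x = pvFirst? L x) (K : List String) (key : String) :
    ∀ (l : List Int) (w : String → PySem.Set Int),
      (∀ x ∈ l, ∃ k0, pvFirst? L x = some k0 ∧ k0 ∈ K) →
      l.foldl (pvStepB first key) ⟨K.map (fun k => (k, w k))⟩
        = PySem.Dict.mk (K.map (fun k => (k,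
            l.foldl (fun s x => if pvFirst? L x == some k && !(k == key)
              then PySem.Set.add s x else s) (w k)))) := by
  intro l
  induction l with
  | nil => intro w _; rfl
  | cons x l ih =>
      intro w h
      obtain ⟨k0, hk0, hk0K⟩ := h x (by simp)
      have hre : (first.get? x).getD "" = k0 := by rw [hfirst, hk0]; rfl
      rw [List.foldl_cons]
      have hstep : ∀ (k : String) (s : PySem.Set Int),
          List.foldl (fun s x => if pvFirst? L x == some k && !(k == key)
              then PySem.Set.add s x else s) s (x :: l)
            = List.foldl (fun s x => if pvFirst? L x == some k && !(k == key)
              then PySem.Set.add s x else s) (if k == k0 && !(k0 == key)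
              then PySem.Set.add s x else s) l := by
        intro k s
        rw [List.foldl_cons]
        congr 1
        rw [hk0]
        by_cases hkk : (k0 == k) = true
        · have : k0 = k := by simpa using hkk
          subst this
          simp
        · have h1 : (k0 == k) = false := by simpa using hkk
          have h2 : (k == k0) = false := by
            rw [Bool.eq_false_iff]
            intro hc
            exact absurd (by simp [eq_of_beq hc]) (Bool.eq_false_iff.mp h1)
          simp [h1, h2]
      by_cases hb : (k0 == key) = true
      · have hred : pvStepB first key ⟨K.map (fun k => (k, w k))⟩ x
            = ⟨K.map (fun k => (k, w k))⟩ := by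
          unfold pvStepB
          rw [hre, if_pos hb]
        rw [hred, ih w (fun y hy => h y (by simp [hy]))]
        congr 1
        apply List.map_congr_left
        intro k _
        rw [hstep k (w k)]
        by_cases hkk : (k == k0) = true
        · simp [hkk, hb]
        · have hk' : (k == k0) = false := by simpa using hkk
          simp [hk']
      · have hb' : (k0 == key) = false := by simpa using hb
        have hred : pvStepB first key ⟨K.map (fun k => (k, w k))⟩ x
            = PySem.Dict.mk (K.map (fun k => (k,
                if k == k0 then PySem.Set.add (w k) x else w k))) := by
          unfold pvStepB
          rw [hre, if_neg (by simp [hb'])]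
          exact pv_modify_items K w k0 PySem.Set.empty (fun s => PySem.Set.add s x) hk0K
        rw [hred, ih _ (fun y hy => h y (by simp [hy]))]
        congr 1
        apply List.map_congr_left
        intro k _
        rw [hstep k (w k)]
        by_cases hkk : (k == k0) = true
        · simp [hkk, hb']
        · have hk' : (k == k0) = false := by simpa using hkk
          simp [hk']

theorem pv_scan_outer (first : PySem.Dict Int String) (L : List (String × List Int))
    (hfirst : ∀ x, first.get? x = pvFirst? L x) (K : List String) :
    ∀ (M : List (String × List Int)) (w : String → PySem.Set Int),
      (∀ kl ∈ M, ∀ x ∈ kl.2, ∃ k0, pvFirst? L x = some k0 ∧ k0 ∈ K) →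
      M.foldl (fun b kl => kl.2.foldl (pvStepB first kl.1) b) ⟨K.map (fun k => (k, w k))⟩
        = PySem.Dict.mk (K.map (fun k => (k,
            M.foldl (fun s kl => kl.2.foldl (fun s x =>
              if pvFirst? L x == some k && !(k == kl.1)
              then PySem.Set.add s x else s) s) (w k)))) := by
  intro M
  induction M with
  | nil => intro w _; rfl
  | cons kl M ih =>
      intro w h
      rw [List.foldl_cons,
        pv_scan_inner first L hfirst K kl.1 kl.2 w (fun x hx => h kl (by simp) x hx),
        ih _ (fun kl' hkl' x hx => h kl' (by simp [hkl']) x hx)]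
      rfl

-- ---- membership facts ----

theorem pv_mem_stream_first (L : List (String × List Int)) (k : String) (y : Int)
    (h : y ∈ pvStream L k) : pvFirst? L y = some k := by
  unfold pvStream at h
  obtain ⟨ql, _, hy⟩ := List.mem_flatMap.mp h
  have hc := (List.mem_filter.mp hy).2
  have hb : (pvFirst? L y == some k) = true := by
    revert hc
    cases pvFirst? L y == some k <;> simp
  exact eq_of_beq hb

theorem pv_stream_sub (L : List (String × List Int)) (k : String) (y : Int)
    (h : y ∈ pvStream L k) : ∃ kl ∈ L, y ∈ kl.2 := by
  obtain ⟨ql, hql, hy⟩ := List.mem_flatMap.mp h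
  exact ⟨ql, hql, (List.mem_filter.mp hy).1⟩

theorem pv_closed_sub (L : List (String × List Int)) (y : Int) (h : y ∈ pvClosed L) :
    ∃ kl ∈ L, y ∈ kl.2 := by
  unfold pvClosed at h
  obtain ⟨l, hl, hy⟩ := List.mem_flatten.mp h
  obtain ⟨kl, _, rfl⟩ := List.mem_map.mp hl
  exact pv_stream_sub L kl.1 y ((PySem.Set.mem_ofList _ _).mp hy)

-- ---- B equals its closed form ----

theorem pv_B_closed (L : List (String × List Int)) (h : Pre_find_duplicate_refs L) :
    find_duplicate_refs_alt L = pvClosed L := by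
  obtain ⟨hkeys, _⟩ := h
  have hmem : ∀ kl ∈ L, ∀ x ∈ kl.2, ∃ k0, pvFirst? L x = some k0 ∧ k0 ∈ L.map Prod.fst :=
    fun kl hkl x hx => pv_first_mem L x ⟨kl, hkl, hx⟩
  have hb0 : pvBuckets0 L
      = PySem.Dict.mk ((L.map Prod.fst).map (fun k => (k, PySem.Set.empty))) := by
    unfold pvBuckets0
    rw [pv_buckets0 L PySem.Dict.empty (fun kl _ => rfl) hkeys]
    congr 1
    rw [List.map_map]
    rfl
  have hscan : pvBucketsFinal L
      = PySem.Dict.mk ((L.map Prod.fst).map (fun k => (k,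
          PySem.Set.ofList (pvStream L k)))) := by
    unfold pvBucketsFinal
    rw [hb0, pv_scan_outer (pvFirstD L) L (pv_first_char L) (L.map Prod.fst) L
      (fun _ => PySem.Set.empty) hmem]
    congr 1
    apply List.map_congr_left
    intro k _
    congr 1
    rw [PySem.List.foldl_congr_mem L _
      (fun s kl => PySem.Set.update s (kl.2.filter
        (fun x => pvFirst? L x == some k && !(k == kl.1)))) PySem.Set.empty
      (fun s kl _ => pv_cond_add _ kl.2 s)]
    rw [pv_update_flatMap]
    rfl
  unfold find_duplicate_refs_alt
  rw [hscan]
  have hvalues : PySem.Dict.values (PySem.Dict.mk ((L.map Prod.fst).map (fun k => (k,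
      PySem.Set.ofList (pvStream L k)))))
      = (L.map Prod.fst).map (fun k => PySem.Set.ofList (pvStream L k)) := by
    unfold PySem.Dict.values
    rw [List.map_map]
    rfl
  rw [hvalues, pv_update_flatMap (fun b => b) _ PySem.Set.empty]
  have hflat : ((L.map Prod.fst).map (fun k => PySem.Set.ofList (pvStream L k))).flatMap
      (fun b => b) = ((L.map Prod.fst).map (fun k => PySem.Set.ofList (pvStream L k))).flatten := by
    simp
  rw [hflat]
  have hnd : ((L.map Prod.fst).map (fun k => PySem.Set.ofList (pvStream L k))).flatten.Nodup := by
    rw [List.nodup_flatten]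
    constructor
    · intro l hl
      obtain ⟨k, _, rfl⟩ := List.mem_map.mp hl
      exact PySem.Set.nodup_ofList _
    · rw [List.pairwise_map]
      refine List.Pairwise.imp ?_ hkeys
      intro k1 k2 hne y hy1 hy2
      have e1 := pv_mem_stream_first L k1 y ((PySem.Set.mem_ofList _ _).mp hy1)
      have e2 := pv_mem_stream_first L k2 y ((PySem.Set.mem_ofList _ _).mp hy2)
      rw [e1] at e2
      exact hne (Option.some.inj e2)
  have : PySem.Set.update PySem.Set.empty
      ((L.map Prod.fst).map (fun k => PySem.Set.ofList (pvStream L k))).flatten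
      = PySem.Set.ofList
        ((L.map Prod.fst).map (fun k => PySem.Set.ofList (pvStream L k))).flatten := rfl
  rw [this, PySem.Set.ofList_eq_self_of_nodup _ hnd]
  unfold pvClosed
  rw [List.map_map]
  rfl

-- ---- cons decompositions ----

theorem pv_mem_s0 (e : String × List Int) (rest : List (String × List Int)) (y : Int) :
    y ∈ pvS0 e rest ↔ (∃ b ∈ rest, y ∈ b.2) ∧ y ∈ e.2 := by
  unfold pvS0
  rw [List.mem_flatMap]
  constructor
  · rintro ⟨b, hb, hy⟩
    rw [PySem.Set.mem_inter] at hy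
    exact ⟨⟨b, hb, (PySem.Set.mem_ofList _ _).mp hy.1⟩, (PySem.Set.mem_ofList _ _).mp hy.2⟩
  · rintro ⟨⟨b, hb, hy⟩, hye⟩
    refine ⟨b, hb, ?_⟩
    rw [PySem.Set.mem_inter]
    exact ⟨(PySem.Set.mem_ofList _ _).mpr hy, (PySem.Set.mem_ofList _ _).mpr hye⟩

theorem pv_A_cons (e : String × List Int) (rest : List (String × List Int))
    (hk : ∀ b ∈ rest, (e.1 == b.1) = false) :
    find_duplicate_refs (e :: rest)
      = PySem.Set.ofList (pvS0 e rest)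
        ++ (find_duplicate_refs rest).filter
            (fun y => !((PySem.Set.ofList (pvS0 e rest)).contains y)) := by
  rw [pv_A_closed, pv_A_closed]
  rw [List.flatMap_cons]
  have h1 : pvInner (e :: rest) e = pvS0 e rest := by
    unfold pvInner pvS0
    rw [List.flatMap_cons]
    have hh : (if e.1 == e.1 then ([] : List Int)
        else PySem.Set.inter (PySem.Set.ofList e.2) (PySem.Set.ofList e.2)) = [] := by simp
    rw [hh, List.nil_append]
    exact pv_flatMap_congr rest _ _ (fun b hb => by rw [if_neg (by simp [hk b hb])])
  have h2 : ∀ a ∈ rest, pvInner (e :: rest) a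
      = PySem.Set.inter (PySem.Set.ofList e.2) (PySem.Set.ofList a.2) ++ pvInner rest a := by
    intro a ha
    unfold pvInner
    rw [List.flatMap_cons]
    congr 1
    have hne : ¬ ((a.1 == e.1) = true) := by
      intro hc
      exact absurd (by simp [eq_of_beq hc]) (Bool.eq_false_iff.mp (hk a ha))
    rw [if_neg hne]
  rw [h1, PySem.Set.ofList_append,
    ← pv_update_flatMap (pvInner (e :: rest)) rest (PySem.Set.ofList (pvS0 e rest)),
    PySem.List.foldl_congr_mem rest _
      (fun d a => PySem.Set.update d
        (PySem.Set.inter (PySem.Set.ofList e.2) (PySem.Set.ofList a.2) ++ pvInner rest a)) _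
      (fun acc a ha => by rw [h2 a ha]),
    pv_absorb (fun a => PySem.Set.inter (PySem.Set.ofList e.2) (PySem.Set.ofList a.2))
      (pvInner rest) rest _ ?_ ,
    pv_update_flatMap, PySem.Set.update_eq_append_filter]
  intro a ha x hx
  rw [PySem.Set.mem_inter] at hx
  rw [PySem.Set.mem_ofList, pv_mem_s0]
  exact ⟨⟨a, ha, (PySem.Set.mem_ofList _ _).mp hx.2⟩, (PySem.Set.mem_ofList _ _).mp hx.1⟩

theorem pv_first_cons (e : String × List Int) (rest : List (String × List Int)) (x : Int) :
    pvFirst? (e :: rest) x = if e.2.contains x then some e.1 else pvFirst? rest x := by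
  unfold pvFirst?
  rw [List.find?_cons]
  by_cases h : x ∈ e.2 <;> simp [h]

theorem pv_contains_ofList {α : Type} [BEq α] [LawfulBEq α] (l : List α) (x : α) :
    (PySem.Set.ofList l).contains x = l.contains x := by
  rw [Bool.eq_iff_iff, PySem.Set.contains_iff]
  simp [PySem.Set.mem_ofList, List.contains_eq_mem]

theorem pv_B_cons (e : String × List Int) (rest : List (String × List Int))
    (hk : ∀ b ∈ rest, (e.1 == b.1) = false) (hvrest : ∀ b ∈ rest, b.2.Nodup) :
    pvClosed (e :: rest)
      = PySem.Set.ofList (pvS0 e rest)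
        ++ (pvClosed rest).filter (fun y => !(e.2.contains y)) := by
  have hfc : ∀ x, (pvFirst? (e :: rest) x == some e.1) = e.2.contains x := by
    intro x
    rw [pv_first_cons]
    by_cases h : e.2.contains x = true
    · have hm : x ∈ e.2 := by simpa using h
      simp [hm, h]
    · have h' : e.2.contains x = false := by simpa using h
      rw [h', if_neg (by simp [h'])]
      cases hf : pvFirst? rest x with
      | none => rfl
      | some k =>
          have hkm := pv_first?_mem_keys rest x k hf
          obtain ⟨b, hb, rfl⟩ := List.mem_map.mp hkm
          have := hk b hb
          simp only [Option.some_beq_some]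
          rw [Bool.eq_false_iff]
          intro hc
          exact (Bool.eq_false_iff.mp this) (by simp [eq_of_beq hc])
  unfold pvClosed
  rw [List.map_cons, List.flatten_cons]
  congr 1
  · -- head bucket = ofList (pvS0 e rest)
    congr 1
    unfold pvStream pvS0
    rw [List.flatMap_cons]
    have hh : e.2.filter (fun x => pvFirst? (e :: rest) x == some e.1 && !(e.1 == e.1)) = [] := by
      have : ∀ x ∈ e.2, (pvFirst? (e :: rest) x == some e.1 && !(e.1 == e.1)) = false := by
        intro x _
        simp
      rw [List.filter_congr this, List.filter_false]
    rw [hh, List.nil_append]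
    apply pv_flatMap_congr
    intro b hb
    rw [PySem.Set.ofList_eq_self_of_nodup b.2 (hvrest b hb)]
    show _ = List.filter (fun x => (PySem.Set.ofList e.2).contains x) b.2
    apply List.filter_congr
    intro x _
    rw [hfc x, pv_contains_ofList]
    have : (!(e.1 == b.1)) = true := by simp [hk b hb]
    rw [this, Bool.and_true]
  · -- tail buckets, filtered
    have hd2 : ∀ kl ∈ rest, pvStream (e :: rest) kl.1
        = (pvStream rest kl.1).filter (fun x => !(e.2.contains x)) := by
      intro kl hkl
      unfold pvStream
      rw [List.flatMap_cons]
      have hh : e.2.filter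
          (fun x => pvFirst? (e :: rest) x == some kl.1 && !(kl.1 == e.1)) = [] := by
        have : ∀ x ∈ e.2, (pvFirst? (e :: rest) x == some kl.1 && !(kl.1 == e.1)) = false := by
          intro x hx
          rw [pv_first_cons, if_pos (by simpa using hx)]
          have hne : (e.1 == kl.1) = false := hk kl hkl
          simp only [Option.some_beq_some]
          rw [Bool.eq_false_iff]
          intro hc
          rw [Bool.and_eq_true] at hc
          exact (Bool.eq_false_iff.mp hne) (hc.1)
        rw [List.filter_congr this, List.filter_false]
      rw [hh, List.nil_append, List.filter_flatMap]
      apply pv_flatMap_congr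
      intro ql hql
      rw [List.filter_filter]
      apply List.filter_congr
      intro x _
      rw [pv_first_cons]
      by_cases hx : e.2.contains x = true
      · rw [if_pos hx, hx]
        have hne : (e.1 == kl.1) = false := hk kl hkl
        simp only [Option.some_beq_some]
        simp [hne]
      · have hx' : e.2.contains x = false := by simpa using hx
        rw [hx']
        simp
    rw [List.map_congr_left (fun kl hkl => by
      rw [hd2 kl hkl, pv_ofList_filter (fun x => !(e.2.contains x)) (pvStream rest kl.1)]),
      pv_filter_flatten]
    congr 1
    rw [List.map_map]
    rfl

-- ---- main induction and assembly ----

theorem pv_main : ∀ (L : List (String × List Int)), Pre_find_duplicate_refs L →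
    find_duplicate_refs L = pvClosed L := by
  intro L
  induction L with
  | nil => intro _; rfl
  | cons e rest ih =>
      intro h
      obtain ⟨hkeys, hvals⟩ := h
      have hcons := List.nodup_cons.mp (by simpa using hkeys :
        (e.1 :: rest.map Prod.fst).Nodup)
      have hk : ∀ b ∈ rest, (e.1 == b.1) = false := by
        intro b hb
        rw [Bool.eq_false_iff]
        intro hc
        exact hcons.1 ((eq_of_beq hc) ▸ List.mem_map.mpr ⟨b, hb, rfl⟩)
      have hpre : Pre_find_duplicate_refs rest :=
        ⟨hcons.2, fun kl hkl => hvals kl (by simp [hkl])⟩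
      rw [pv_A_cons e rest hk, pv_B_cons e rest hk (fun b hb => hpre.2 b hb), ih hpre]
      congr 1
      apply List.filter_congr
      intro y hy
      obtain ⟨b, hb, hyb⟩ := pv_closed_sub rest y hy
      congr 1
      rw [Bool.eq_iff_iff, PySem.Set.contains_iff, PySem.Set.mem_ofList, pv_mem_s0]
      constructor
      · intro hc
        simpa using hc.2
      · intro hc
        exact ⟨⟨b, hb, hyb⟩, by simpa using hc⟩

-- ===== VERDICT (by name: the statement is the Claim_ definition above) =====
theorem find_duplicate_refs_spec : Claim_equal_find_duplicate_refs := by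
  intro layers _ hpre
  unfold Spec_find_duplicate_refs
  rw [pv_main layers hpre, pv_B_closed layers hpre]
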